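-- pv_equiv track=rewrite | github.com/Tsedao/Structure_and_Interpretation_of_Computer_Programs | projects/hog/hog.py | free_bacon
-- ===== SOURCE A (Python) =====
-- def free_bacon(opponent_score):
--     """Return the points scored from rolling 0 dice (Free Bacon)."""
--     # BEGIN PROBLEM 2
--     "*** REPLACE THIS LINE ***"
--     a = opponent_score
--     i = 0
--     while a >= 1:
--         a = a // 10
--         i = i + 1
--     if i == 1:
--         return 1 + max(0, opponent_score)
--     else:
--         return 1 + max(opponent_score % 10, (opponent_score // 10) % 10)
-- ===== SOURCE B (Python) =====
-- def free_bacon(opponent_score):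
--     """Return the points scored from rolling 0 dice (Free Bacon)."""
--     s = str(opponent_score % 100).zfill(2)
--     return 1 + max(int(s[0]), int(s[1]))
-- ===== Notes on version B (the rewrite author's own statement) =====
-- stated objective: simpler
-- what changed: Replaced the digit-counting while loop and two-branch arithmetic with a string rendering: take the score's last two decimal digits via Python modulo, format them as a zero-padded decimal string, and return one plus the maximum of the two digit characters.
import Mathlib
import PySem

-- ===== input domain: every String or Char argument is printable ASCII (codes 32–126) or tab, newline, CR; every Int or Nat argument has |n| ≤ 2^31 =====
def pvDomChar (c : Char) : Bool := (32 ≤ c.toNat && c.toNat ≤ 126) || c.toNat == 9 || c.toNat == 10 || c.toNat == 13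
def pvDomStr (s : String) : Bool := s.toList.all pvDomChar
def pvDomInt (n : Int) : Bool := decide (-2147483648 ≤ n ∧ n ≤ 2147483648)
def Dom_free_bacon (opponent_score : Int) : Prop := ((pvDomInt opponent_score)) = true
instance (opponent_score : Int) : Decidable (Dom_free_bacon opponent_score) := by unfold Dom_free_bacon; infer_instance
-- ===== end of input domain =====

-- B drops A's digit-counting while loop and branch: it reduces the score mod 100, renders
-- it as a zero-padded 2-character decimal string and takes 1 + max of the two digit
-- characters (objective: simpler).

-- ===== PORT A =====
-- the 'while a >= 1: a = a // 10; i = i + 1' loop, returning the final i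
def free_bacon_loop (a : Int) (i : Int) : Int :=
  if 1 ≤ a then free_bacon_loop (PySem.Int.floordiv a 10) (i + 1) else i
termination_by a.toNat
decreasing_by
  have h1 : PySem.Int.floordiv a 10 < a := by
    have := (PySem.Int.floordiv_lt_iff_lt_mul (a := a) (b := 10) (q := a) (by omega)).mpr (by omega)
    exact this
  omega

def free_bacon (opponent_score : Int) : Int :=
  let i := free_bacon_loop opponent_score 0
  if i = 1 then 1 + max 0 opponent_score
  else 1 + max (PySem.Int.mod opponent_score 10)
               (PySem.Int.mod (PySem.Int.floordiv opponent_score 10) 10)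

-- ===== PORT B =====
-- s = str(opponent_score % 100).zfill(2); return 1 + max(int(s[0]), int(s[1]))
-- s always has exactly 2 digit characters, so the index and int() never raise;
-- the '.getD 0' defaults are unreachable.
def free_bacon_alt (opponent_score : Int) : Int :=
  let s := PySem.Str.zfill (PySem.Int.toStr (PySem.Int.mod opponent_score 100)) 2
  let d0 := ((PySem.Str.pyGet? s 0).bind (fun c => PySem.Int.ofChars? [c])).getD 0
  let d1 := ((PySem.Str.pyGet? s 1).bind (fun c => PySem.Int.ofChars? [c])).getD 0
  1 + max d0 d1

-- ===== PRECONDITION & SPEC =====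
def Spec_free_bacon (opponent_score : Int) (out : Int) : Prop := out = free_bacon_alt opponent_score
instance (opponent_score : Int) (out : Int) : Decidable (Spec_free_bacon opponent_score out) := by unfold Spec_free_bacon; infer_instance

-- ===== CLAIM =====
def Claim_equal_free_bacon : Prop := ∀ (opponent_score : Int), Dom_free_bacon opponent_score → Spec_free_bacon opponent_score (free_bacon opponent_score)

-- ===== LEMMAS AND PROOFS =====

-- the loop never decreases i
theorem free_bacon_loop_ge (a i : Int) : i ≤ free_bacon_loop a i := by
  fun_induction free_bacon_loop a i with
  | case1 a i h ih => omega
  | case2 a i h => omega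

-- the digit count is 1 only when 1 ≤ s ≤ 9
theorem free_bacon_loop_one {s : Int} (h : free_bacon_loop s 0 = 1) : 1 ≤ s ∧ s ≤ 9 := by
  rw [free_bacon_loop] at h
  by_cases hs : 1 ≤ s
  · rw [if_pos hs] at h
    rw [free_bacon_loop] at h
    by_cases hd : 1 ≤ PySem.Int.floordiv s 10
    · rw [if_pos hd] at h
      have := free_bacon_loop_ge (PySem.Int.floordiv (PySem.Int.floordiv s 10) 10) (0 + 1 + 1)
      omega
    · have hlt : PySem.Int.floordiv s 10 < 1 := by omega
      have := (PySem.Int.floordiv_lt_iff_lt_mul (a := s) (b := 10) (q := 1) (by omega)).mp hlt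
      omega
  · simp [hs] at h

-- A equals the last-two-digits formula on every input
theorem free_bacon_formula (s : Int) :
    free_bacon s = 1 + max (PySem.Int.mod s 10)
                           (PySem.Int.mod (PySem.Int.floordiv s 10) 10) := by
  unfold free_bacon
  by_cases h : free_bacon_loop s 0 = 1
  · obtain ⟨h1, h9⟩ := free_bacon_loop_one h
    simp only [h, if_pos]
    have hmod : PySem.Int.mod s 10 = s := by
      rw [PySem.Int.mod_eq_emod_of_pos (by omega)]
      exact Int.emod_eq_of_lt (by omega) (by omega)
    have hdiv : PySem.Int.floordiv s 10 = 0 := by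
      exact (PySem.Int.floordiv_eq_iff_of_pos (by omega)).mpr (by constructor <;> omega)
    rw [hmod, hdiv]
    have : PySem.Int.mod 0 10 = 0 := by decide
    rw [this]
    omega
  · simp [h]

-- B equals the same formula on each residue 0..99 (kernel check of the string pipeline)
theorem alt_on_residue : ∀ k : Fin 100,
    free_bacon_alt (k : Int) = 1 + max (PySem.Int.mod (k : Int) 10)
                                       (PySem.Int.mod (PySem.Int.floordiv (k : Int) 10) 10) := by
  decide

theorem free_bacon_spec : Claim_equal_free_bacon := by
  intro s _
  unfold Spec_free_bacon
  rw [free_bacon_formula]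
  -- B only looks at s % 100
  have hr : PySem.Int.mod s 100 = s % 100 := PySem.Int.mod_eq_emod_of_pos (by omega)
  have hb : (0:Int) ≤ s % 100 ∧ s % 100 < 100 := ⟨Int.emod_nonneg s (by omega), Int.emod_lt_of_pos s (by omega)⟩
  have halt : free_bacon_alt s = free_bacon_alt (s % 100) := by
    unfold free_bacon_alt
    rw [hr, PySem.Int.mod_eq_emod_of_pos (by omega), Int.emod_emod_of_dvd s (by norm_num)]
  set r : Int := s % 100 with hrdef
  have hk : r = ((⟨r.toNat, by omega⟩ : Fin 100) : Int) := by simp; omega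
  have h100 := alt_on_residue ⟨r.toNat, by omega⟩
  rw [halt, hk, h100]
  -- reduce both formula sides to ediv/emod and close with omega
  have e1 : PySem.Int.mod (((⟨r.toNat, by omega⟩ : Fin 100) : Int)) 10 = PySem.Int.mod s 10 := by
    rw [PySem.Int.mod_eq_emod_of_pos (by omega), PySem.Int.mod_eq_emod_of_pos (by omega), ← hk]
    rw [hrdef, Int.emod_emod_of_dvd s (by norm_num)]
  have e2 : PySem.Int.mod (PySem.Int.floordiv (((⟨r.toNat, by omega⟩ : Fin 100) : Int)) 10) 10
      = PySem.Int.mod (PySem.Int.floordiv s 10) 10 := by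
    rw [PySem.Int.floordiv_eq_ediv_of_pos (by omega), PySem.Int.floordiv_eq_ediv_of_pos (by omega),
        PySem.Int.mod_eq_emod_of_pos (by omega), PySem.Int.mod_eq_emod_of_pos (by omega), ← hk, hrdef]
    omega
  rw [e1, e2]
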